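-- pv_equiv track=rewrite | github.com/dorisyu0000/RoundNavCopy | static/json/generate_trial.py | regular_tree
-- ===== SOURCE A (Python) =====
-- def regular_tree(branching):
--     """
--     Generates a regular tree where each level has a specified number of branches.
--     """
--     tree = []
--
--     def rec(d):
--         children = []
--         tree.append(children)
--         idx = len(tree) - 1
--         if d < len(branching):
--             for i in range(branching[d]):
--                 child = rec(d + 1)
--                 children.append(child)
--         return idx
--
--     rec(0)
--     return tree
-- ===== SOURCE B (Python) =====
-- def regular_tree(branching):
--     """
--     Generates a regular tree where each level has a specified number of branches.
--     """
--     L = len(branching)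
--     # subtree sizes: sub[d] = number of nodes in a subtree rooted at depth d
--     sub = [1] * (L + 1)
--     for d in range(L - 1, -1, -1):
--         sub[d] = 1 + max(branching[d], 0) * sub[d + 1]
--
--     def block(d, base):
--         # pre-order block of rows for the subtree rooted at index `base`, depth d
--         if d == L:
--             return [[]]
--         step = sub[d + 1]
--         kids = [base + 1 + i * step for i in range(branching[d])]
--         rows = [kids]
--         for k in kids:
--             rows += block(d + 1, k)
--         return rows
--
--     return block(0, 0)
-- ===== Notes on version B (the rewrite author's own statement) =====
-- stated objective: alternative
-- what changed: Instead of growing one shared mutable list via DFS side effects and reading child indices off its current length, B precomputes subtree sizes bottom-up and derives every child's index by the closed form base+1+i*sub[d+1], assembling the rows by concatenation of independent subtree blocks.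
import Mathlib
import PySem

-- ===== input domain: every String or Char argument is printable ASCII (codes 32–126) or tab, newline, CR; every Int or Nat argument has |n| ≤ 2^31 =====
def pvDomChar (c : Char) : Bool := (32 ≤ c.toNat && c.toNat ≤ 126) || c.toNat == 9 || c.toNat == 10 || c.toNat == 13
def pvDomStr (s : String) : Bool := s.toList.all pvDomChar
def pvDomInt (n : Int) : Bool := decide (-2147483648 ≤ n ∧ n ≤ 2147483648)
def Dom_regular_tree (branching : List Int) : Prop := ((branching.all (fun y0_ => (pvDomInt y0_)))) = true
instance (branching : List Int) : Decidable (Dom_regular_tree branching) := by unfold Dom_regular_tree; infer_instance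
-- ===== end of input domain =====

-- B replaces A's DFS over a shared mutable list (child index = current length) by
-- bottom-up subtree sizes and closed-form child indices base+1+i*sub[d+1]; objective: alternative.

-- ===== PORT A =====
-- rec(d) with the mutable outer list `tree` threaded as state; returns (tree, idx).
def pvRecA (br : List Int) (d : Nat) (tree : List (List Int)) : List (List Int) × Int :=
  let tree1 := tree ++ [([] : List Int)]
  let idx := tree.length
  if h : d < br.length then
    ((PySem.List.pyRange 0 br[d] 1).foldl
      (fun t _ =>
        let r := pvRecA br (d + 1) t
        r.1.set idx ((r.1[idx]!) ++ [r.2])) tree1,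
     (idx : Int))
  else (tree1, (idx : Int))
termination_by br.length - d

def regular_tree (branching : List Int) : List (List Int) :=
  (pvRecA branching 0 []).1

-- ===== PORT B =====
-- sub[d] built by the downward loop of Source B (foldr = loop from the last index down).
def pvSub (bs : List Int) : List Int :=
  bs.foldr (fun b acc => (1 + max b 0 * acc.headI) :: acc) [1]

-- block(d, base) of Source B: rows for the subtree rooted at index `base` at depth d.
def pvBlock (br : List Int) (sub : List Int) (d : Nat) (base : Int) : List (List Int) :=
  if h : d < br.length then
    let step := sub[d + 1]!
    let kids := (PySem.List.pyRange 0 br[d] 1).map (fun i => base + 1 + i * step)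
    kids.foldl (fun rows k => rows ++ pvBlock br sub (d + 1) k) [kids]
  else [[]]
termination_by br.length - d

def regular_tree_alt (branching : List Int) : List (List Int) :=
  pvBlock branching (pvSub branching) 0 0

-- ===== PRECONDITION & SPEC =====
def Spec_regular_tree (branching : List Int) (out : List (List Int)) : Prop := out = regular_tree_alt branching
instance (branching : List Int) (out : List (List Int)) : Decidable (Spec_regular_tree branching out) := by unfold Spec_regular_tree; infer_instance

-- ===== CLAIM (what is proved, stated in full; the proofs are below) =====
def Claim_equal_regular_tree : Prop := ∀ (branching : List Int), Dom_regular_tree branching → Spec_regular_tree branching (regular_tree branching)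

-- ===== LEMMAS AND PROOFS =====

-- number of nodes of a subtree whose remaining branching factors are bs
def pvSubF : List Int → Nat
  | [] => 1
  | b :: bs => 1 + b.toNat * pvSubF bs

-- the child indices emitted in order: n indices starting at s with stride m
def pvGens (m : Int) : Nat → Int → List Int
  | 0, _ => []
  | n + 1, s => s :: pvGens m n (s + m)

lemma pvSub_cons (b : Int) (bs : List Int) :
    pvSub (b :: bs) = (1 + max b 0 * (pvSub bs).headI) :: pvSub bs := by
  simp [pvSub]

lemma pvSub_shape : ∀ bs : List Int, ∃ t, pvSub bs = (pvSubF bs : Int) :: t := by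
  intro bs
  induction bs with
  | nil => exact ⟨[], by simp [pvSub, pvSubF]⟩
  | cons b bs ih =>
      obtain ⟨t, ht⟩ := ih
      refine ⟨pvSub bs, ?_⟩
      rw [pvSub_cons, ht]
      simp only [List.headI, pvSubF]
      congr 1
      push_cast [Int.toNat_eq_max]
      ring

lemma pvSub_get : ∀ (bs : List Int) (d : Nat), d ≤ bs.length →
    (pvSub bs)[d]! = (pvSubF (bs.drop d) : Int) := by
  intro bs
  induction bs with
  | nil =>
      intro d hd
      have : d = 0 := by simpa using hd
      subst this
      simp [pvSub, pvSubF]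
  | cons b bs ih =>
      intro d hd
      cases d with
      | zero =>
          obtain ⟨t, ht⟩ := pvSub_shape (b :: bs)
          rw [ht]
          simp
      | succ d =>
          rw [pvSub_cons]
          simpa using ih d (by simpa using hd)

lemma pvGens_eq_map (m : Int) : ∀ (n : Nat) (s : Int),
    pvGens m n s = (List.range n).map (fun k : Nat => s + (k : Int) * m) := by
  intro n
  induction n with
  | zero => intro s; simp [pvGens]
  | succ n ih =>
      intro s
      rw [List.range_succ_eq_map]
      simp only [pvGens, ih, List.map_cons, List.map_map, Nat.cast_zero, zero_mul, add_zero]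
      congr 1
      apply List.map_congr_left
      intro k _
      simp only [Function.comp]
      push_cast
      ring

lemma foldl_append_len {α : Type} (f : α → List (List Int)) (m : Nat)
    (hm : ∀ k, (f k).length = m) :
    ∀ (ks : List α) (init : List (List Int)),
      (ks.foldl (fun rows k => rows ++ f k) init).length = init.length + ks.length * m := by
  intro ks
  induction ks with
  | nil => intro init; simp
  | cons k ks ih =>
      intro init
      simp only [List.foldl_cons, ih, List.length_append, hm, List.length_cons]
      ring

lemma foldl_append_flatten {α : Type} (f : α → List (List Int)) :
    ∀ (ks : List α) (init : List (List Int)),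
      ks.foldl (fun rows k => rows ++ f k) init = init ++ (ks.map f).flatten := by
  intro ks
  induction ks with
  | nil => intro init; simp
  | cons k ks ih => intro init; simp [List.foldl_cons, ih]

lemma pvBlock_len (br : List Int) : ∀ (n d : Nat) (base : Int), br.length - d = n →
    (pvBlock br (pvSub br) d base).length = pvSubF (br.drop d) := by
  intro n
  induction n with
  | zero =>
      intro d base h
      have hd : ¬ d < br.length := by omega
      have hnil : br.drop d = [] := List.drop_eq_nil_of_le (by omega)
      rw [pvBlock, hnil]
      simp [hd, pvSubF]
  | succ n ih =>
      intro d base h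
      have hd : d < br.length := by omega
      rw [pvBlock]
      simp only [hd, dif_pos]
      rw [foldl_append_len _ (pvSubF (br.drop (d + 1)))
            (fun k => ih (d + 1) k (by omega))]
      rw [List.drop_eq_getElem_cons hd]
      simp [pvSubF, PySem.List.length_pyRange_one]

lemma getElem!_append_cons (t : List (List Int)) (c : List Int) (bs : List (List Int)) :
    (t ++ c :: bs)[t.length]! = c := by
  rw [List.getElem!_eq_getElem?_getD, List.getElem?_append_right (le_refl _)]
  simp

lemma set_append_cons (t : List (List Int)) (c v : List Int) (bs : List (List Int)) :
    (t ++ c :: bs).set t.length v = t ++ v :: bs := by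
  induction t with
  | nil => simp
  | cons x t ih => simp [ih]

lemma pvBlock_cons (br : List Int) (sub : List Int) (d : Nat) (base : Int) (hd : d < br.length) :
    pvBlock br sub d base
      = ((PySem.List.pyRange 0 br[d] 1).map (fun i => base + 1 + i * sub[d + 1]!))
        :: (((PySem.List.pyRange 0 br[d] 1).map (fun i => base + 1 + i * sub[d + 1]!)).map
              (pvBlock br sub (d + 1))).flatten := by
  rw [pvBlock]
  simp only [hd, dif_pos]
  rw [foldl_append_flatten]
  simp

lemma pvInner (br : List Int) (d m : Nat) (tree : List (List Int))
    (hm : ∀ base, (pvBlock br (pvSub br) (d + 1) base).length = m)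
    (hrec : ∀ t : List (List Int),
      pvRecA br (d + 1) t = (t ++ pvBlock br (pvSub br) (d + 1) (t.length : Int), (t.length : Int))) :
    ∀ (l : List Int) (c : List Int) (bs : List (List Int)),
      l.foldl (fun t _ =>
          let r := pvRecA br (d + 1) t
          r.1.set tree.length ((r.1[tree.length]!) ++ [r.2])) (tree ++ c :: bs)
      = tree ++ (c ++ pvGens (m : Int) l.length ((tree.length : Int) + 1 + bs.length))
          :: (bs ++ ((pvGens (m : Int) l.length ((tree.length : Int) + 1 + bs.length)).map
                (pvBlock br (pvSub br) (d + 1))).flatten) := by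
  intro l
  induction l with
  | nil => intro c bs; simp [pvGens]
  | cons x l ih =>
      intro c bs
      rw [List.foldl_cons]
      have hT : ((tree ++ c :: bs).length : Int) = (tree.length : Int) + 1 + bs.length := by
        simp; ring
      have hstep :
          (let r := pvRecA br (d + 1) (tree ++ c :: bs)
           r.1.set tree.length ((r.1[tree.length]!) ++ [r.2]))
          = tree ++ (c ++ [(tree.length : Int) + 1 + bs.length])
              :: (bs ++ pvBlock br (pvSub br) (d + 1) ((tree.length : Int) + 1 + bs.length)) := by
        simp only [hrec, hT]
        rw [show tree ++ c :: bs ++ pvBlock br (pvSub br) (d + 1) ((tree.length : Int) + 1 + bs.length)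
              = tree ++ c :: (bs ++ pvBlock br (pvSub br) (d + 1) ((tree.length : Int) + 1 + bs.length)) by simp]
        rw [getElem!_append_cons, set_append_cons]
      rw [hstep, ih]
      have hlen : ((bs ++ pvBlock br (pvSub br) (d + 1) ((tree.length : Int) + 1 + bs.length)).length : Int)
          = (bs.length : Int) + m := by
        simp [hm]
      rw [hlen]
      rw [show ((tree.length : Int) + 1 + ((bs.length : Int) + (m : Int)))
            = (tree.length : Int) + 1 + (bs.length : Int) + (m : Int) from by ring]
      simp [pvGens, List.append_assoc]

lemma pvMain (br : List Int) : ∀ (n d : Nat) (tree : List (List Int)), br.length - d = n →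
    pvRecA br d tree = (tree ++ pvBlock br (pvSub br) d (tree.length : Int), (tree.length : Int)) := by
  intro n
  induction n with
  | zero =>
      intro d tree h
      have hd : ¬ d < br.length := by omega
      rw [pvRecA, pvBlock]
      simp [hd]
  | succ n ih =>
      intro d tree h
      have hd : d < br.length := by omega
      have hm : ∀ base, (pvBlock br (pvSub br) (d + 1) base).length = pvSubF (br.drop (d + 1)) :=
        fun base => pvBlock_len br n (d + 1) base (by omega)
      have hrec : ∀ t : List (List Int),
          pvRecA br (d + 1) t = (t ++ pvBlock br (pvSub br) (d + 1) (t.length : Int), (t.length : Int)) :=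
        fun t => ih (d + 1) t (by omega)
      have hsub : (pvSub br)[d + 1]! = (pvSubF (br.drop (d + 1)) : Int) :=
        pvSub_get br (d + 1) (by omega)
      have hkids : pvGens ((pvSubF (br.drop (d + 1)) : Nat) : Int)
            (PySem.List.pyRange 0 br[d] 1).length ((tree.length : Int) + 1)
          = (PySem.List.pyRange 0 br[d] 1).map
              (fun i => (tree.length : Int) + 1 + i * (pvSub br)[d + 1]!) := by
        rw [hsub, PySem.List.length_pyRange_one, pvGens_eq_map, PySem.List.pyRange_one, List.map_map]
        apply List.map_congr_left
        intro k _
        simp only [Function.comp]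
        ring
      rw [pvRecA]
      simp only [hd, dif_pos]
      rw [pvBlock_cons br (pvSub br) d _ hd]
      have hinner := pvInner br d (pvSubF (br.drop (d + 1))) tree hm hrec
        (PySem.List.pyRange 0 br[d] 1) [] []
      simp only [List.nil_append, List.length_nil, Nat.cast_zero, add_zero] at hinner
      rw [show tree ++ [([] : List Int)] = tree ++ ([] : List Int) :: ([] : List (List Int)) from rfl]
      rw [hinner, hkids]

-- ===== VERDICT (by name: the statement is the Claim_ definition above) =====
theorem regular_tree_spec : Claim_equal_regular_tree := by
  intro branching _
  unfold Spec_regular_tree regular_tree regular_tree_alt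
  rw [pvMain branching branching.length 0 [] (by omega)]
  simp
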